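-- pv_equiv track=rewrite | github.com/prepare-coding-test-in-42/bogeoung_coding_test | PROGRAMMERS_HIGH_SCORE_KIT/HEAP/MoreSpicy.py | solution
-- ===== SOURCE A (Python) =====
-- import heapq
--
-- def solution(scoville, K):
--     answer = 0
--     heapq.heapify(scoville)
--     while True:
--         if scoville[0] >= K:
--             break
--         if(len(scoville) <= 1):
--             return -1
--         newFood = heapq.heappop(scoville) + heapq.heappop(scoville) * 2
--         heapq.heappush(scoville, newFood)
--         answer += 1
--     return answer
-- ===== SOURCE B (Python) =====
-- def solution(scoville, K):
--     # Sorted-list strategy: keep the list ascending, pop the two front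
--     # (smallest) elements, insert the mix back at its sorted position.
--     scoville.sort()
--     answer = 0
--     while True:
--         if scoville[0] >= K:
--             return answer
--         if len(scoville) <= 1:
--             return -1
--         first = scoville.pop(0)
--         second = scoville.pop(0)
--         new = first + second * 2
--         i = 0
--         while i < len(scoville) and scoville[i] < new:
--             i += 1
--         scoville.insert(i, new)
--         answer += 1
-- ===== Notes on version B (the rewrite author's own statement) =====
-- stated objective: alternative
-- what changed: Replaces the binary heap with a maintained ascending sorted list: sort once, repeatedly pop the two front elements and reinsert the mix at its sorted position by a linear scan, so min-extraction becomes trivial head access.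
import Mathlib
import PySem

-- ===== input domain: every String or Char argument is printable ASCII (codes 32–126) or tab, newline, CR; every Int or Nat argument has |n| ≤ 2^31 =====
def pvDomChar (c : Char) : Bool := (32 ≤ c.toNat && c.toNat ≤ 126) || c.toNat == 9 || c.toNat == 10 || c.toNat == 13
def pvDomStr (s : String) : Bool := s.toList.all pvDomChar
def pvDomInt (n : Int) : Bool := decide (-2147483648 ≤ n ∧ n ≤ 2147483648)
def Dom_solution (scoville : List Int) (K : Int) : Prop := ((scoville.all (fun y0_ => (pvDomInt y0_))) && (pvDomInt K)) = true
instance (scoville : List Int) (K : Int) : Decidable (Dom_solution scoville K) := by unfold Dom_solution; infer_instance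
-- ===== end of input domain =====

-- B replaces A's binary heap by a maintained ascending sorted list (sort once, pop the two
-- front elements, reinsert the mix in sorted position); equivalence is about the RETURN value
-- only — both Pythons mutate the argument list (A heapifies it, B sorts/pops/inserts).
-- In port A the heapq stdlib calls are ported by their specification on the heap's contents:
-- heapify keeps the contents (scoville[0] then reads the minimum), heappop removes and returns
-- the minimum, heappush adds the element; exact for the returned int on every admitted input.

-- ===== PORT A =====
def heapGo (l : List Int) (K ans : Int) : Int :=
  match hmin : PySem.List.min? l (fun x => x) with   -- scoville[0] of the heap; none = IndexError
  | none => -1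
  | some m =>
    if m ≥ K then ans
    else if l.length ≤ 1 then -1
    else
      match hmin2 : PySem.List.min? (l.erase m) (fun x => x) with  -- second heappop
      | none => -1  -- unreachable: l has ≥ 2 elements
      | some m2 =>
        -- newFood = heappop + heappop * 2, heappush, answer += 1
        heapGo ((m + m2 * 2) :: (l.erase m).erase m2) K (ans + 1)
termination_by l.length
decreasing_by
  have hm := PySem.List.min?_mem hmin
  have hm2 := PySem.List.min?_mem hmin2
  have h1 : (l.erase m).length = l.length - 1 := List.length_erase_of_mem hm
  have h2 : ((l.erase m).erase m2).length = (l.erase m).length - 1 := List.length_erase_of_mem hm2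
  simp only [List.length_cons, h1, h2]
  omega

def solution (scoville : List Int) (K : Int) : Int :=
  heapGo scoville K 0    -- heapify keeps the contents; answer starts at 0

-- ===== PORT B =====
-- linear insertion keeping the list sorted (the inner while/insert of Source B)
def insS (v : Int) : List Int → List Int
  | [] => [v]
  | x :: xs => if x < v then x :: insS v xs else v :: x :: xs

theorem insS_length (v : Int) (l : List Int) : (insS v l).length = l.length + 1 := by
  induction l with
  | nil => rfl
  | cons x xs ih => simp only [insS]; split <;> simp [ih]

def sortGo (l : List Int) (K ans : Int) : Int :=
  match l with
  | [] => -1    -- scoville[0] = IndexError; unreachable under Pre_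
  | x :: xs =>
    if x ≥ K then ans
    else if (x :: xs).length ≤ 1 then -1
    else
      match xs with
      | [] => -1  -- unreachable: length ≥ 2
      | y :: ys => sortGo (insS (x + y * 2) ys) K (ans + 1)
termination_by l.length
decreasing_by simp only [insS_length, List.length_cons]; omega

def solution_alt (scoville : List Int) (K : Int) : Int :=
  sortGo (PySem.List.sorted scoville (fun x => x) false) K 0

-- ===== PRECONDITION & SPEC =====
-- A raises IndexError (scoville[0] on an empty heap) exactly when the list is empty.
def Pre_solution (scoville : List Int) (K : Int) : Prop := scoville ≠ []
instance (scoville : List Int) (K : Int) : Decidable (Pre_solution scoville K) := by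
  unfold Pre_solution; infer_instance
def pvWitness_solution : List Int × Int := ([1, 2, 3, 9, 10, 12], 7)

def Spec_solution (scoville : List Int) (K : Int) (out : Int) : Prop := out = solution_alt scoville K
instance (scoville : List Int) (K : Int) (out : Int) : Decidable (Spec_solution scoville K out) := by unfold Spec_solution; infer_instance

-- ===== CLAIM (what is proved, stated in full; the proofs are below) =====
def Claim_equal_solution : Prop := ∀ (scoville : List Int) (K : Int), Dom_solution scoville K → Pre_solution scoville K → Spec_solution scoville K (solution scoville K)

-- ===== LEMMAS AND PROOFS =====

theorem insS_perm (v : Int) (l : List Int) : (insS v l).Perm (v :: l) := by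
  induction l with
  | nil => simp [insS]
  | cons x xs ih =>
    simp only [insS]
    split
    · exact (ih.cons x).trans (List.Perm.swap v x xs)
    · exact List.Perm.refl _

theorem insS_pairwise (v : Int) (l : List Int) (h : l.Pairwise (· ≤ ·)) :
    (insS v l).Pairwise (· ≤ ·) := by
  induction l with
  | nil => simp [insS]
  | cons x xs ih =>
    rcases List.pairwise_cons.mp h with ⟨hx, hxs⟩
    simp only [insS]
    split
    · rename_i hlt
      refine List.pairwise_cons.mpr ⟨?_, ih hxs⟩
      intro a ha
      rcases List.mem_cons.mp ((insS_perm v xs).mem_iff.mp ha) with rfl | hmem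
      · exact le_of_lt hlt
      · exact hx a hmem
    · rename_i hnlt
      refine List.pairwise_cons.mpr ⟨?_, h⟩
      intro a ha
      rcases List.mem_cons.mp ha with rfl | hmem
      · exact le_of_not_gt hnlt
      · exact le_trans (le_of_not_gt hnlt) (hx a hmem)

-- the minimum A pops is exactly the head of the sorted list B maintains
theorem min?_eq_head_of_sorted (l : List Int) (x : Int) (xs : List Int)
    (hperm : (x :: xs).Perm l) (hpw : (x :: xs).Pairwise (· ≤ ·)) :
    PySem.List.min? l (fun x => x) = some x := by
  cases hmin : PySem.List.min? l (fun x => x) with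
  | none =>
    have := (PySem.List.min?_eq_none_iff l (fun x => x)).mp hmin
    subst this
    exact absurd (List.Perm.length_eq hperm) (by simp)
  | some m =>
    have hmem : m ∈ l := PySem.List.min?_mem hmin
    have hmlex : m ∈ x :: xs := hperm.mem_iff.mpr hmem
    have hxm : x ≤ m := by
      rcases hmlex with _ | hmem'
      · exact le_refl _
      · exact (List.pairwise_cons.mp hpw).1 m (by assumption)
    have hmx : m ≤ x := PySem.List.min?_isMin hmin x (hperm.mem_iff.mp (.head _))
    exact congrArg some (le_antisymm hmx hxm)

theorem heapGo_eq_sortGo (n : Nat) (l : List Int) (K ans : Int)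
    (hn : l.length = n) (hne : l ≠ []) :
    heapGo l K ans = sortGo (PySem.List.sorted l (fun x => x) false) K ans := by
  induction n using Nat.strong_induction_on generalizing l ans with
  | _ n ih =>
    have hperm : (PySem.List.sorted l (fun x => x) false).Perm l := PySem.List.sorted_perm _ _ _
    have hpw : (PySem.List.sorted l (fun x => x) false).Pairwise (· ≤ ·) := by
      simpa using PySem.List.sorted_pairwise l (fun x => x)
    cases hs : PySem.List.sorted l (fun x => x) false with
    | nil => exact absurd ((PySem.List.sorted_eq_nil_iff l (fun x => x) false).mp hs) hne
    | cons x xs =>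
      rw [hs] at hperm hpw
      have hmin : PySem.List.min? l (fun x => x) = some x :=
        min?_eq_head_of_sorted l x xs hperm hpw
      rw [heapGo.eq_def, hmin]
      dsimp only
      by_cases hK : x ≥ K
      · rw [if_pos hK, sortGo.eq_def]
        simp [hK]
      · rw [if_neg hK]
        have hlen : l.length = xs.length + 1 := by simpa using hperm.length_eq.symm
        by_cases hsmall : l.length ≤ 1
        · have hxs : xs = [] := by
            cases xs with
            | nil => rfl
            | cons y ys => simp [hlen] at hsmall
          subst hxs
          rw [if_pos hsmall, sortGo.eq_def]
          simp [hK]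
        · rw [if_neg hsmall]
          cases xs with
          | nil => simp [hlen] at hsmall
          | cons y ys =>
            -- second pop: the erased list is a permutation of y :: ys
            have hperm1 : (y :: ys).Perm (l.erase x) := by
              have := hperm.erase x
              simpa using this
            have hpw1 : (y :: ys).Pairwise (· ≤ ·) := (List.pairwise_cons.mp hpw).2
            have hmin2 : PySem.List.min? (l.erase x) (fun x => x) = some y :=
              min?_eq_head_of_sorted (l.erase x) y ys hperm1 hpw1
            rw [hmin2]
            dsimp only
            -- the new heap contents are a permutation of insS (x + y*2) ys
            have hperm2 : (ys).Perm ((l.erase x).erase y) := by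
              have := hperm1.erase y
              simpa using this
            have hpermNew : (insS (x + y * 2) ys).Perm ((x + y * 2) :: (l.erase x).erase y) :=
              (insS_perm _ _).trans (hperm2.cons _)
            have hsorted2 :
                PySem.List.sorted ((x + y * 2) :: (l.erase x).erase y) (fun x => x) false =
                  insS (x + y * 2) ys :=
              PySem.List.sorted_id_eq_of_perm_of_pairwise _ _ hpermNew
                (insS_pairwise _ _ (List.pairwise_cons.mp hpw1).2)
            have hlen2 : ((x + y * 2) :: (l.erase x).erase y).length = n - 1 := by
              have hys : ys.length = ((l.erase x).erase y).length := hperm2.length_eq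
              simp only [List.length_cons] at hlen
              simp only [List.length_cons]
              omega
            have hlt : n - 1 < n := by omega
            rw [ih (n - 1) hlt _ _ hlen2 (by simp), hsorted2]
            have hstep : sortGo (x :: y :: ys) K ans = sortGo (insS (x + y * 2) ys) K (ans + 1) := by
              rw [sortGo.eq_def]
              dsimp only
              rw [if_neg hK, if_neg (by simp : ¬ ((x :: y :: ys).length ≤ 1))]
            rw [hstep]

-- ===== VERDICT (by name: the statement is the Claim_ definition above) =====
theorem solution_spec : Claim_equal_solution := by
  intro scoville K _ hpre
  unfold Spec_solution solution solution_alt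
  exact heapGo_eq_sortGo scoville.length scoville K 0 rfl hpre
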